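-- pv_equiv track=rewrite | github.com/rich-iannone/great-docs | great_docs/_renderer/renderer.py | _fence_doctest_blocks
-- ===== SOURCE A (Python) =====
-- def _fence_doctest_blocks(text: str) -> str:
--     """Wrap unfenced ``>>>`` doctest lines in ````python`` fenced code blocks.
--
--     Detects consecutive lines that start with ``>>>`` or ``...`` (doctest
--     continuation) and wraps each group in a fenced code block so Quarto renders
--     them as syntax-highlighted Python instead of nested blockquotes.
--     """
--     lines = text.split("\n")
--     result: list[str] = []
--     doctest_buf: list[str] = []
--
--     def _flush():
--         if doctest_buf:
--             result.append("```python")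
--             result.extend(doctest_buf)
--             result.append("```")
--             doctest_buf.clear()
--
--     for line in lines:
--         stripped = line.lstrip()
--         if stripped.startswith(">>> ") or stripped == ">>>" or stripped.startswith("... "):
--             doctest_buf.append(line)
--         else:
--             _flush()
--             result.append(line)
--
--     _flush()
--     return "\n".join(result)
-- ===== SOURCE B (Python) =====
-- def _is_doctest(line):
--     stripped = line.lstrip()
--     return stripped.startswith(">>> ") or stripped == ">>>" or stripped.startswith("... ")
--
--
-- def _fence_doctest_blocks(text: str) -> str:
--     """Wrap maximal runs of doctest lines in ```python fences (run-splitting scan)."""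
--     lines = text.split("\n")
--     out: list[str] = []
--     i, n = 0, len(lines)
--     while i < n:
--         if _is_doctest(lines[i]):
--             j = i
--             while j < n and _is_doctest(lines[j]):
--                 j += 1
--             out.append("```python")
--             out.extend(lines[i:j])
--             out.append("```")
--             i = j
--         else:
--             out.append(lines[i])
--             i += 1
--     return "\n".join(out)
-- ===== Notes on version B (the rewrite author's own statement) =====
-- stated objective: alternative
-- what changed: Replaces A's buffer-and-flush accumulator (pending doctest buffer flushed on each non-doctest line and at the end) by a run-splitting scan: an index loop that, at each doctest line, advances to the end of the maximal doctest run and emits the fenced block at once.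
import Mathlib
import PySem

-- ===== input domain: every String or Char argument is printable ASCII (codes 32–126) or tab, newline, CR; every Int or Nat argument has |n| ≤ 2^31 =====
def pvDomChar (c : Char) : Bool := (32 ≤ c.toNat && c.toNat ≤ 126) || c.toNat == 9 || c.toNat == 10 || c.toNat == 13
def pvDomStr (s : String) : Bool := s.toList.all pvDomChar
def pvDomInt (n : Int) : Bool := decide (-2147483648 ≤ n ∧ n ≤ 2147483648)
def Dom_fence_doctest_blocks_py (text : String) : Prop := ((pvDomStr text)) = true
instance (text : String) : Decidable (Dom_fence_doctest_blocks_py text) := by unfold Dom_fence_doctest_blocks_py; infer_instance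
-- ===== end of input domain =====

-- B replaces A's buffer-and-flush accumulator by a run-splitting scan (alternative decomposition, same cost).

-- ===== PORT A =====
-- flush of A's pending doctest buffer into the result
def pvFlushA (result buf : List String) : List String :=
  if buf ≠ [] then result ++ ["```python"] ++ buf ++ ["```"] else result

-- one step of A's for-loop over (result, doctest_buf)
def pvStepA (st : List String × List String) (line : String) : List String × List String :=
  let stripped := PySem.Str.lstrip line
  if PySem.Str.startswith stripped ">>> " || stripped == ">>>" || PySem.Str.startswith stripped "... " then
    (st.1, st.2 ++ [line])
  else
    (pvFlushA st.1 st.2 ++ [line], [])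

def fence_doctest_blocks_py (text : String) : String :=
  let lines := (PySem.Str.split? text "\n").getD []  -- sep "\n" ≠ "", so split? is some
  let st := lines.foldl pvStepA ([], [])
  PySem.Str.join "\n" (pvFlushA st.1 st.2)

-- ===== PORT B =====
def pvIsDoctest (line : String) : Bool :=
  let stripped := PySem.Str.lstrip line
  PySem.Str.startswith stripped ">>> " || stripped == ">>>" || PySem.Str.startswith stripped "... "

-- B's outer while-loop: at a doctest line the inner loop reaches the end of the
-- maximal doctest run (takeWhile/dropWhile) and the fenced block is emitted at once
def pvGoB : List String → List String
  | [] => []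
  | l :: rest =>
    if pvIsDoctest l then
      "```python" :: (l :: rest.takeWhile pvIsDoctest) ++ "```" :: pvGoB (rest.dropWhile pvIsDoctest)
    else
      l :: pvGoB rest
termination_by ls => ls.length
decreasing_by
  · simp only [List.length_cons]
    exact Nat.lt_succ_of_le (List.length_dropWhile_le pvIsDoctest rest)
  · simp

def fence_doctest_blocks_py_alt (text : String) : String :=
  PySem.Str.join "\n" (pvGoB ((PySem.Str.split? text "\n").getD []))

-- ===== PRECONDITION & SPEC =====
def Spec_fence_doctest_blocks_py (text : String) (out : String) : Prop := out = fence_doctest_blocks_py_alt text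
instance (text : String) (out : String) : Decidable (Spec_fence_doctest_blocks_py text out) := by unfold Spec_fence_doctest_blocks_py; infer_instance

-- ===== CLAIM (what is proved, stated in full; the proofs are below) =====
def Claim_equal_fence_doctest_blocks_py : Prop := ∀ (text : String), Dom_fence_doctest_blocks_py text → Spec_fence_doctest_blocks_py text (fence_doctest_blocks_py text)

-- ===== LEMMAS AND PROOFS =====

-- abstract A's loop as a recursion over the lines with a pending buffer
def pvGState (buf : List String) : List String → List String
  | [] => pvFlushA [] buf
  | l :: ls =>
    if pvIsDoctest l then pvGState (buf ++ [l]) ls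
    else pvFlushA [] buf ++ l :: pvGState [] ls

lemma pvFlushA_eq (res buf : List String) : pvFlushA res buf = res ++ pvFlushA [] buf := by
  unfold pvFlushA; split <;> simp

lemma foldl_stepA (lines : List String) : ∀ (res buf : List String),
    pvFlushA (lines.foldl pvStepA (res, buf)).1 (lines.foldl pvStepA (res, buf)).2
      = res ++ pvGState buf lines := by
  induction lines with
  | nil =>
    intro res buf
    simp only [List.foldl_nil, pvGState]
    exact pvFlushA_eq res buf
  | cons l ls ih =>
    intro res buf
    simp only [List.foldl_cons, pvStepA, pvGState, pvIsDoctest]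
    split
    · exact ih res (buf ++ [l])
    · rw [ih _ []]
      rw [pvFlushA_eq res buf]
      simp

lemma gstate_eq (lines : List String) : ∀ (buf : List String),
    pvGState buf lines =
      if buf = [] then pvGoB lines
      else "```python" :: buf ++ lines.takeWhile pvIsDoctest ++ "```" :: pvGoB (lines.dropWhile pvIsDoctest) := by
  induction lines with
  | nil =>
    intro buf
    by_cases h : buf = [] <;> simp [pvGState, pvGoB, pvFlushA, h]
  | cons l ls ih =>
    intro buf
    simp only [pvGState]
    by_cases hd : pvIsDoctest l
    · rw [if_pos hd, ih (buf ++ [l])]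
      by_cases h : buf = []
      · subst h
        simp [pvGoB, hd]
      · simp [h, hd]
    · rw [if_neg hd, ih []]
      by_cases h : buf = []
      · subst h
        simp [pvGoB, hd, pvFlushA]
      · simp [h, hd, pvFlushA, pvGoB]

-- ===== VERDICT (by name: the statement is the Claim_ definition above) =====
theorem fence_doctest_blocks_py_spec : Claim_equal_fence_doctest_blocks_py := by
  intro text _
  show fence_doctest_blocks_py text = fence_doctest_blocks_py_alt text
  simp only [fence_doctest_blocks_py, fence_doctest_blocks_py_alt]
  rw [foldl_stepA _ [] [], gstate_eq]
  simp
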